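-- pv_equiv track=rewrite | github.com/tupes/School | CS333/kasiski_examination.py | getRepeatedSeqSpacings
-- ===== SOURCE A (Python) =====
-- def getRepeatedSeqSpacings(message):
-- 	""" Goes through the message and finds any 3 to 5 letter sequences
-- 	that are repeated. Returns a dict with the keys of the sequence and
-- 	values of a list of spacings (num of letters between the repeats)"""
--
-- 	seq_spacings = {}
-- 	for seq_length in range(3, 6):
-- 		message_end = len(message) - seq_length
-- 		for seq_start in range(message_end):
-- 			seq_end = seq_start + seq_length
-- 			seq = message[seq_start : seq_end]
-- 			for i in range(seq_end, message_end):
-- 				if message[i: i + seq_length] == seq: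
-- 					seq_spacings.setdefault(seq, []).append(i - seq_start)
-- 	return seq_spacings
-- ===== SOURCE B (Python) =====
-- def getRepeatedSeqSpacings(message):
-- 	""" Same task and same scanned window set as the original (starts
-- 	0 .. len(message)-seq_length-1): one pass builds a hash index from
-- 	each subsequence to its list of start positions, then spacings are
-- 	emitted only for matching occurrence pairs. """
-- 	seq_spacings = {}
-- 	for seq_length in range(3, 6):
-- 		message_end = len(message) - seq_length
-- 		positions = {}
-- 		for j in range(message_end):
-- 			positions.setdefault(message[j : j + seq_length], []).append(j)
-- 		for i in range(message_end):
-- 			seq = message[i : i + seq_length]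
-- 			for j in positions[seq]:
-- 				if j >= i + seq_length:
-- 					seq_spacings.setdefault(seq, []).append(j - i)
-- 	return seq_spacings
-- ===== Notes on version B (the rewrite author's own statement) =====
-- stated objective: faster
-- what changed: B replaces A's compare-every-later-window inner scan with a per-length hash index built in one pass mapping each subsequence to its list of start positions, then emits spacings only for matching occurrence pairs.
import Mathlib
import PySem

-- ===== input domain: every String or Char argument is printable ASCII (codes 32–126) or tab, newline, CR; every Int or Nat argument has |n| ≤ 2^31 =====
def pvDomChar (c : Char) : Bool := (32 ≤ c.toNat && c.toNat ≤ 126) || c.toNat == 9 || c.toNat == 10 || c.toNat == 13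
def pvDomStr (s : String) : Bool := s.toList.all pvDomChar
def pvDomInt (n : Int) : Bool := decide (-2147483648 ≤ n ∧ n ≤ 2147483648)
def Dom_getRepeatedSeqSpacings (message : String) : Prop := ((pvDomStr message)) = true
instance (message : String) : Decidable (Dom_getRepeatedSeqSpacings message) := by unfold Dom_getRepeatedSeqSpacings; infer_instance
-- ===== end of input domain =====

-- B replaces A's quadratic inner scan with a per-length hash index from each subsequence
-- to its list of start positions (same scanned window set as A), emitting spacings only
-- for matching occurrence pairs.

-- ===== PORT A =====
def getRepeatedSeqSpacings (message : String) : List (String × List Int) :=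
  ((PySem.List.pyRange 3 6 1).foldl (fun seqSpacings seqLength =>
    let messageEnd := PySem.Str.len message - seqLength
    (PySem.List.pyRange 0 messageEnd 1).foldl (fun seqSpacings seqStart =>
      let seqEnd := seqStart + seqLength
      let seq := PySem.Str.slice message (some seqStart) (some seqEnd)
      (PySem.List.pyRange seqEnd messageEnd 1).foldl (fun seqSpacings i =>
        if PySem.Str.slice message (some i) (some (i + seqLength)) == seq then
          seqSpacings.modify seq [] (· ++ [i - seqStart])
        else seqSpacings) seqSpacings) seqSpacings) PySem.Dict.empty).items

-- ===== PORT B =====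
def getRepeatedSeqSpacings_alt (message : String) : List (String × List Int) :=
  ((PySem.List.pyRange 3 6 1).foldl (fun seqSpacings seqLength =>
    let messageEnd := PySem.Str.len message - seqLength
    let positions : PySem.Dict String (List Int) :=
      (PySem.List.pyRange 0 messageEnd 1).foldl (fun positions j =>
        positions.modify (PySem.Str.slice message (some j) (some (j + seqLength))) [] (· ++ [j]))
        PySem.Dict.empty
    (PySem.List.pyRange 0 messageEnd 1).foldl (fun seqSpacings i =>
      let seq := PySem.Str.slice message (some i) (some (i + seqLength))
      -- positions[seq]: seq was indexed at j = i in the first pass, so the key is present; getD is exact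
      ((positions.getD seq []).foldl (fun seqSpacings j =>
        if i + seqLength ≤ j then seqSpacings.modify seq [] (· ++ [j - i])
        else seqSpacings) seqSpacings)) seqSpacings) PySem.Dict.empty).items

-- ===== PRECONDITION & SPEC =====
def Spec_getRepeatedSeqSpacings (message : String) (out : List (String × List Int)) : Prop := out = getRepeatedSeqSpacings_alt message
instance (message : String) (out : List (String × List Int)) : Decidable (Spec_getRepeatedSeqSpacings message out) := by unfold Spec_getRepeatedSeqSpacings; infer_instance

-- ===== CLAIM (what is proved, stated in full; the proofs are below) =====
def Claim_equal_getRepeatedSeqSpacings : Prop := ∀ (message : String), Dom_getRepeatedSeqSpacings message → Spec_getRepeatedSeqSpacings message (getRepeatedSeqSpacings message)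

-- ===== LEMMAS AND PROOFS =====

lemma pv_positions (message : String) (L m : Int) (c : String) :
    ((PySem.List.pyRange 0 m 1).foldl (fun p j =>
        p.modify (PySem.Str.slice message (some j) (some (j + L))) [] (· ++ [j]))
        (PySem.Dict.empty : PySem.Dict String (List Int))).getD c []
    = (PySem.List.pyRange 0 m 1).filter
        (fun j => PySem.Str.slice message (some j) (some (j + L)) == c) := by
  have : ((PySem.List.pyRange 0 m 1).foldl (fun p j =>
        p.modify (PySem.Str.slice message (some j) (some (j + L))) [] (· ++ [j]))
        (PySem.Dict.empty : PySem.Dict String (List Int)))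
      = (((PySem.List.pyRange 0 m 1).map
          (fun j => (PySem.Str.slice message (some j) (some (j + L)), j))).foldl
          (fun p q => p.modify q.1 [] (· ++ [q.2])) PySem.Dict.empty) := by
    rw [List.foldl_map]
  rw [this, PySem.Dict.getD_foldl_modify_append]
  simp [List.filter_map, Function.comp_def]

lemma pv_filter_range (q : Int → Bool) (m c : Int) (h0 : 0 ≤ m) :
    ((PySem.List.pyRange 0 c 1).filter q).filter (fun j => decide (m ≤ j))
      = (PySem.List.pyRange m c 1).filter q := by
  rw [List.filter_filter]
  by_cases hmc : m ≤ c
  · rw [PySem.List.pyRange_one_append 0 m c h0 hmc, List.filter_append]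
    have e1 : (PySem.List.pyRange 0 m 1).filter (fun j => decide (m ≤ j) && q j) = [] := by
      rw [List.filter_eq_nil_iff]
      intro a ha
      have := PySem.List.mem_pyRange_one.mp ha
      simp [decide_eq_false (by omega : ¬ m ≤ a)]
    have e3 : (PySem.List.pyRange m c 1).filter (fun j => decide (m ≤ j) && q j)
        = (PySem.List.pyRange m c 1).filter q := by
      apply List.filter_congr
      intro a ha
      have := PySem.List.mem_pyRange_one.mp ha
      simp [decide_eq_true (by omega : m ≤ a)]
    rw [e1, e3]; simp
  · have hc : PySem.List.pyRange m c 1 = [] := by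
      simp [PySem.List.pyRange_one, Int.toNat_of_nonpos (by omega : c - m ≤ 0)]
    rw [hc]
    simp only [List.filter_nil]
    rw [List.filter_eq_nil_iff]
    intro a ha
    have := PySem.List.mem_pyRange_one.mp ha
    simp [decide_eq_false (by omega : ¬ m ≤ a)]

lemma pv_step (message : String) (L : Int) (hL : 1 ≤ L) (d : PySem.Dict String (List Int)) :
    (PySem.List.pyRange 0 (PySem.Str.len message - L) 1).foldl (fun d i =>
        (PySem.List.pyRange (i + L) (PySem.Str.len message - L) 1).foldl (fun d j =>
          if PySem.Str.slice message (some j) (some (j + L))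
              == PySem.Str.slice message (some i) (some (i + L)) then
            d.modify (PySem.Str.slice message (some i) (some (i + L))) [] (· ++ [j - i])
          else d) d) d
    = (PySem.List.pyRange 0 (PySem.Str.len message - L) 1).foldl (fun d i =>
        ((((PySem.List.pyRange 0 (PySem.Str.len message - L) 1).foldl (fun p j =>
              p.modify (PySem.Str.slice message (some j) (some (j + L))) [] (· ++ [j]))
              (PySem.Dict.empty : PySem.Dict String (List Int))).getD
            (PySem.Str.slice message (some i) (some (i + L))) []).foldl (fun d j =>
          if i + L ≤ j then
            d.modify (PySem.Str.slice message (some i) (some (i + L))) [] (· ++ [j - i])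
          else d) d)) d := by
  set N := PySem.Str.len message with hN
  symm
  apply PySem.List.foldl_congr_mem
  intro acc i hi
  obtain ⟨hi0, hi1⟩ := PySem.List.mem_pyRange_one.mp hi
  rw [pv_positions message L (N - L) (PySem.Str.slice message (some i) (some (i + L)))]
  have hfold : ∀ (X : List Int) (acc : PySem.Dict String (List Int)),
      X.foldl (fun d j =>
        if i + L ≤ j then
          d.modify (PySem.Str.slice message (some i) (some (i + L))) [] (· ++ [j - i])
        else d) acc
      = (X.filter (fun j => decide (i + L ≤ j))).foldl (fun d j =>
          d.modify (PySem.Str.slice message (some i) (some (i + L))) [] (· ++ [j - i])) acc := by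
    intro X acc
    rw [List.foldl_filter]
    simp only [decide_eq_true_eq]
  rw [hfold]
  rw [pv_filter_range (fun j => PySem.Str.slice message (some j) (some (j + L))
        == PySem.Str.slice message (some i) (some (i + L))) (i + L) (N - L) (by omega)]
  rw [List.foldl_filter]

theorem pv_main (message : String) :
    getRepeatedSeqSpacings message = getRepeatedSeqSpacings_alt message := by
  simp only [getRepeatedSeqSpacings, getRepeatedSeqSpacings_alt]
  refine congrArg PySem.Dict.items ?_
  apply PySem.List.foldl_congr_mem
  intro acc Lv hmem
  have := PySem.List.mem_pyRange_one.mp hmem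
  exact pv_step message Lv (by omega) acc

-- ===== VERDICT (by name: the statement is the Claim_ definition above) =====
theorem getRepeatedSeqSpacings_spec : Claim_equal_getRepeatedSeqSpacings := by
  intro message _
  exact pv_main message
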